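-- pv_equiv track=rewrite | github.com/NLP-Discourse-SoochowU/DTCP | upd_parser/eval.py | get_chains
-- ===== SOURCE A (Python) =====
-- def get_chains(arr_):
--     chains = []
--     flag_li = [0 for _ in range(len(arr_))]
--     for idx in range(1, len(arr_)):
--         if flag_li[idx] != 0:
--             continue
--         flag_li[idx] = 1
--         if arr_[idx] == 0:
--             continue
--         else:
--             tmp_idx = idx
--             tmp_chain = str(tmp_idx) + " "
--             len_ = 1
--             while arr_[tmp_idx] != 0 and arr_[tmp_idx] > tmp_idx:
--                 tmp_idx = int(arr_[tmp_idx])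
--                 flag_li[tmp_idx] = 1
--                 tmp_chain += (str(tmp_idx) + " ")
--                 len_ += 1
--             chains.append(tmp_chain)
--     return chains
-- ===== SOURCE B (Python) =====
-- def get_chains(arr_):
--     n = len(arr_)
--     # backward DP: suffix[i] = the full pointer-chain string starting at node i
--     suffix = [""] * n
--     for i in range(n - 1, 0, -1):
--         nxt = int(arr_[i])
--         suffix[i] = str(i) + " " + (suffix[nxt] if nxt != 0 and nxt > i else "")
--     targets = {int(arr_[j]) for j in range(1, n) if arr_[j] > j}
--     return [suffix[i] for i in range(1, n) if arr_[i] != 0 and i not in targets]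
-- ===== Notes on version B (the rewrite author's own statement) =====
-- stated objective: alternative
-- what changed: B eliminates A's while-loop chain walking and visited-flag bookkeeping: a backward dynamic-programming pass memoizes the full chain string of every node (suffix[i] = str(i)+' ' + suffix[arr_[i]] when the pointer goes forward), and the result is emitted by direct table lookup at the head indices (nonzero, not pointed to).
import Mathlib
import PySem

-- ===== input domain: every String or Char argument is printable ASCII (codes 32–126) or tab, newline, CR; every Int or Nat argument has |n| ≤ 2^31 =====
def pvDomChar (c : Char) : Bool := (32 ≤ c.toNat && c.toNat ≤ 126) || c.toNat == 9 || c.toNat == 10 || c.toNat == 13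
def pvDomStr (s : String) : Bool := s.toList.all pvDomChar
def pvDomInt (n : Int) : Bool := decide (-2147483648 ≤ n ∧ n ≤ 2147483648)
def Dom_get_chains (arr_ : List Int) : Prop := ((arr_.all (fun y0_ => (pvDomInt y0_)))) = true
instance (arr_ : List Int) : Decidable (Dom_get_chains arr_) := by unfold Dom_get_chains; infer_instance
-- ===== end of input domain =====

-- B replaces A's while-loop chain walking + visited flags by a backward dynamic-programming
-- pass that memoizes every node's full chain string, emitted by table lookup at the heads:
-- an alternative decomposition, not claimed faster.

-- ===== PORT A =====
-- the inner 'while arr_[tmp_idx] != 0 and arr_[tmp_idx] > tmp_idx' loop; fuel = len(arr_) suffices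
-- because tmp_idx strictly increases and stays < len(arr_) on inputs satisfying Pre_.
def pvWhileA (arr : List Int) : Nat → Int → List Int → String → (List Int × String)
  | 0, _, flag, chain => (flag, chain)
  | fuel+1, t, flag, chain =>
    if PySem.List.pyGetD arr t 0 ≠ 0 ∧ PySem.List.pyGetD arr t 0 > t then
      pvWhileA arr fuel (PySem.List.pyGetD arr t 0)
        (PySem.List.pySetD flag (PySem.List.pyGetD arr t 0) 1)
        (chain ++ PySem.Int.toStr (PySem.List.pyGetD arr t 0) ++ " ")
    else (flag, chain)

-- the 'for idx in range(1, len(arr_))' loop, recursion on the number of remaining iterations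
def pvForA (arr : List Int) : Nat → Int → List Int → List String → List String
  | 0, _, _, chains => chains
  | rem+1, idx, flag, chains =>
    if PySem.List.pyGetD flag idx 0 ≠ 0 then
      pvForA arr rem (idx+1) flag chains
    else
      let flag1 := PySem.List.pySetD flag idx 1
      if PySem.List.pyGetD arr idx 0 = 0 then
        pvForA arr rem (idx+1) flag1 chains
      else
        let r := pvWhileA arr arr.length idx flag1 (PySem.Int.toStr idx ++ " ")
        pvForA arr rem (idx+1) r.1 (chains ++ [r.2])

def get_chains (arr_ : List Int) : List String :=
  pvForA arr_ (arr_.length - 1) 1 (List.replicate arr_.length 0) []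

-- ===== PORT B =====
-- one iteration of B's backward pass:
--   nxt = int(arr_[i]); suffix[i] = str(i) + " " + (suffix[nxt] if nxt != 0 and nxt > i else "")
def pvBuildStep (arr : List Int) (S : List String) (i : Int) : List String :=
  let nxt := PySem.List.pyGetD arr i 0
  PySem.List.pySetD S i
    (PySem.Int.toStr i ++ " " ++ (if nxt ≠ 0 ∧ nxt > i then PySem.List.pyGetD S nxt "" else ""))

-- suffix = [""] * n; for i in range(n - 1, 0, -1): …
def pvSuffixB (arr : List Int) : List String :=
  (PySem.List.pyRange (PySem.List.len arr - 1) 0 (-1)).foldl (pvBuildStep arr)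
    (List.replicate arr.length "")

-- targets = {int(arr_[j]) for j in range(1, n) if arr_[j] > j}
def pvTargetsB (arr : List Int) : PySem.Set Int :=
  (PySem.List.pyRange 1 (PySem.List.len arr) 1).foldl
    (fun s j => if PySem.List.pyGetD arr j 0 > j then PySem.Set.add s (PySem.List.pyGetD arr j 0) else s)
    PySem.Set.empty

-- the final comprehension: [suffix[i] for i in range(1, n) if arr_[i] != 0 and i not in targets]
def pvEmitStep (arr : List Int) (S : List String) (targets : PySem.Set Int)
    (chains : List String) (i : Int) : List String :=
  if PySem.List.pyGetD arr i 0 ≠ 0 ∧ ¬ PySem.Set.contains targets i then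
    chains ++ [PySem.List.pyGetD S i ""]
  else chains

def get_chains_alt (arr_ : List Int) : List String :=
  (PySem.List.pyRange 1 (PySem.List.len arr_) 1).foldl
    (pvEmitStep arr_ (pvSuffixB arr_) (pvTargetsB arr_)) []

-- ===== PRECONDITION & SPEC =====
-- Pre_ excludes exactly the inputs on which A raises IndexError: a forward pointer that is
-- followed (arr_[j] > j for some j ≥ 1) but points at or beyond len(arr_).
def Pre_get_chains (arr_ : List Int) : Prop :=
  ∀ j : Nat, j < arr_.length → 1 ≤ j → arr_.getD j 0 > (j : Int) → arr_.getD j 0 < (arr_.length : Int)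
instance (arr_ : List Int) : Decidable (Pre_get_chains arr_) := by unfold Pre_get_chains; infer_instance

def pvWitness_get_chains : List Int := [0, 2, 0]

def Spec_get_chains (arr_ : List Int) (out : List String) : Prop := out = get_chains_alt arr_
instance (arr_ : List Int) (out : List String) : Decidable (Spec_get_chains arr_ out) := by unfold Spec_get_chains; infer_instance

-- ===== CLAIM (what is proved, stated in full; the proofs are below) =====
def Claim_equal_get_chains : Prop := ∀ (arr_ : List Int), Dom_get_chains arr_ → Pre_get_chains arr_ → Spec_get_chains arr_ (get_chains arr_)

-- ===== LEMMAS AND PROOFS =====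

-- the tail of the chain string after a start node: what the while loop appends after str(idx)+" "
def pvWTail (arr : List Int) : Nat → Int → String
  | 0, _ => ""
  | fuel+1, t =>
    if PySem.List.pyGetD arr t 0 ≠ 0 ∧ PySem.List.pyGetD arr t 0 > t then
      PySem.Int.toStr (PySem.List.pyGetD arr t 0) ++ " " ++ pvWTail arr fuel (PySem.List.pyGetD arr t 0)
    else ""

-- 'pvReach arr i k' = node k has been traversed by the time the for loop has finished
-- iterations 1..i; A's flag array after iterations 1..i is its characteristic function.
inductive pvReach (arr : List Int) (i : Int) : Int → Prop
  | base (k : Int) : 1 ≤ k → k ≤ i → pvReach arr i k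
  | step (j k : Int) : pvReach arr i j → PySem.List.pyGetD arr j 0 = k → j < k → pvReach arr i k

-- total-form indexing at a nonnegative index is List.getD
lemma pvAtD_nonneg {α : Type} (xs : List α) (j : Int) (d : α) (h : 0 ≤ j) :
    PySem.List.pyGetD xs j d = xs.getD j.toNat d := by
  simp [PySem.List.pyGetD, PySem.List.pyGet?_of_nonneg xs h, List.getD]

lemma pvAt_ne_zero_lt (arr : List Int) (j : Int) (h0 : 0 ≤ j)
    (h : PySem.List.pyGetD arr j 0 ≠ 0) : j < (arr.length : Int) := by
  by_contra hge
  apply h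
  rw [pvAtD_nonneg arr j 0 h0, List.getD_eq_default]
  omega

lemma pvReach_one_le {arr : List Int} {i k : Int} (h : pvReach arr i k) : 1 ≤ k := by
  induction h with
  | base k h1 h2 => exact h1
  | step j k hj he hjk ih => omega

lemma pvReach_zero {arr : List Int} {k : Int} (h : pvReach arr 0 k) : False := by
  induction h with
  | base k h1 h2 => omega
  | step j k hj he hjk ih => exact ih

lemma pvReach_mono {arr : List Int} {i i' k : Int} (hii : i ≤ i') (h : pvReach arr i k) :
    pvReach arr i' k := by
  induction h with
  | base k h1 h2 => exact .base k h1 (by omega)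
  | step j k hj he hjk ih => exact .step j k ih he hjk

def pvTgt (arr : List Int) (k : Int) : Prop :=
  ∃ j : Int, 1 ≤ j ∧ j < (arr.length : Int) ∧ PySem.List.pyGetD arr j 0 = k ∧ j < k

-- head test: at iteration idx the flag is set iff idx is some forward pointer's target
lemma pvReach_pred_iff_tgt (arr : List Int) (idx : Int) (h1 : 1 ≤ idx) :
    pvReach arr (idx - 1) idx ↔ pvTgt arr idx := by
  constructor
  · intro h
    cases h with
    | base _ hk1 hk2 => omega
    | step j _ hj he hjk =>
        have hj1 : 1 ≤ j := pvReach_one_le hj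
        have hjlen : j < (arr.length : Int) :=
          pvAt_ne_zero_lt arr j (by omega) (by rw [he]; omega)
        exact ⟨j, hj1, hjlen, he, hjk⟩
  · rintro ⟨j, hj1, hjlen, he, hjk⟩
    exact .step j idx (.base j hj1 (by omega)) he hjk

-- skipped iteration (flag already set): the reach set does not change
lemma pvReach_succ_of_reach (arr : List Int) (idx k : Int) (_h1 : 1 ≤ idx)
    (hr : pvReach arr (idx - 1) idx) :
    pvReach arr idx k ↔ pvReach arr (idx - 1) k := by
  constructor
  · intro h
    induction h with
    | base k hk1 hk2 =>
        by_cases hk : k = idx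
        · exact hk ▸ hr
        · exact .base k hk1 (by omega)
    | step j k hj he hjk ih => exact .step j k ih he hjk
  · exact pvReach_mono (by omega)

-- iteration marking only idx itself (arr_[idx] == 0)
lemma pvReach_succ_zero (arr : List Int) (idx k : Int) (h1 : 1 ≤ idx)
    (hz : PySem.List.pyGetD arr idx 0 = 0) :
    pvReach arr idx k ↔ (pvReach arr (idx - 1) k ∨ k = idx) := by
  constructor
  · intro h
    induction h with
    | base k hk1 hk2 =>
        by_cases hk : k = idx
        · exact Or.inr hk
        · exact Or.inl (.base k hk1 (by omega))
    | step j k hj he hjk ih =>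
        rcases ih with hL | rfl
        · exact Or.inl (.step j k hL he hjk)
        · have h1j : 1 ≤ j := pvReach_one_le hj
          rw [hz] at he
          omega
  · rintro (h | rfl)
    · exact pvReach_mono (by omega) h
    · exact .base _ h1 le_rfl

-- the sequence of nodes visited by the while loop after its start node
def pvChain (arr : List Int) : Nat → Int → List Int
  | 0, _ => []
  | fuel+1, t =>
    if PySem.List.pyGetD arr t 0 ≠ 0 ∧ PySem.List.pyGetD arr t 0 > t then
      PySem.List.pyGetD arr t 0 :: pvChain arr fuel (PySem.List.pyGetD arr t 0)
    else []

lemma pvChain_bounds {arr : List Int} (hP : Pre_get_chains arr) :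
    ∀ (fuel : Nat) (t : Int), 1 ≤ t → t < (arr.length : Int) →
      ∀ c ∈ pvChain arr fuel t, t < c ∧ c < (arr.length : Int) := by
  intro fuel
  induction fuel with
  | zero => simp [pvChain]
  | succ n ih =>
      intro t ht1 htl c hc
      unfold pvChain at hc
      split at hc
      case isTrue hcond =>
        have ha : PySem.List.pyGetD arr t 0 = arr.getD t.toNat 0 := pvAtD_nonneg arr t 0 (by omega)
        have halen : PySem.List.pyGetD arr t 0 < (arr.length : Int) := by
          rw [ha]
          exact hP t.toNat (by omega) (by omega) (by rw [← ha]; omega)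
        rcases List.mem_cons.1 hc with rfl | hc'
        · exact ⟨hcond.2, halen⟩
        · have := ih (PySem.List.pyGetD arr t 0) (by omega) halen c hc'
          exact ⟨by omega, this.2⟩
      case isFalse => simp at hc

-- with fuel ≥ len - t the chain is complete: it is closed under following forward pointers
lemma pvChain_closed {arr : List Int} (hP : Pre_get_chains arr) :
    ∀ (fuel : Nat) (t : Int), 1 ≤ t → t < (arr.length : Int) →
      (arr.length - t.toNat ≤ fuel) →
      ∀ j ∈ pvChain arr fuel t, ∀ k, PySem.List.pyGetD arr j 0 = k → j < k →
        k ∈ pvChain arr fuel t := by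
  intro fuel
  induction fuel with
  | zero => simp [pvChain]
  | succ n ih =>
      intro t ht1 htl hfuel j hj k he hjk
      unfold pvChain at hj ⊢
      split at hj
      case isTrue hcond =>
        have ha : PySem.List.pyGetD arr t 0 = arr.getD t.toNat 0 := pvAtD_nonneg arr t 0 (by omega)
        have halen : PySem.List.pyGetD arr t 0 < (arr.length : Int) := by
          rw [ha]
          exact hP t.toNat (by omega) (by omega) (by rw [← ha]; omega)
        rw [if_pos hcond]
        rcases List.mem_cons.1 hj with rfl | hj'
        · -- j is the head of the chain: k is the next node
          apply List.mem_cons_of_mem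
          have hn1 : 1 ≤ n := by omega
          obtain ⟨m, rfl⟩ : ∃ m, n = m + 1 := ⟨n - 1, by omega⟩
          unfold pvChain
          rw [if_pos ⟨by omega, by omega⟩, he]
          exact List.mem_cons_self
        · exact List.mem_cons_of_mem _
            (ih (PySem.List.pyGetD arr t 0) (by omega) halen (by omega) j hj' k he hjk)
      case isFalse => simp at hj

lemma pvChain_reach {arr : List Int} {i : Int} :
    ∀ (fuel : Nat) (t : Int), pvReach arr i t →
      ∀ c ∈ pvChain arr fuel t, pvReach arr i c := by
  intro fuel
  induction fuel with
  | zero => simp [pvChain]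
  | succ n ih =>
      intro t hrt c hc
      unfold pvChain at hc
      split at hc
      case isTrue hcond =>
        have hstep : pvReach arr i (PySem.List.pyGetD arr t 0) := .step t _ hrt rfl hcond.2
        rcases List.mem_cons.1 hc with rfl | hc'
        · exact hstep
        · exact ih _ hstep c hc'
      case isFalse => simp at hc

-- traversing iteration: the reach set grows by idx and the visited chain
lemma pvReach_succ_chain (arr : List Int) (idx k : Int) (hP : Pre_get_chains arr)
    (h1 : 1 ≤ idx) (hlt : idx < (arr.length : Int))
    (hnz : PySem.List.pyGetD arr idx 0 ≠ 0) :
    pvReach arr idx k ↔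
      (pvReach arr (idx - 1) k ∨ k = idx ∨ k ∈ pvChain arr arr.length idx) := by
  constructor
  · intro h
    induction h with
    | base k hk1 hk2 =>
        by_cases hk : k = idx
        · exact Or.inr (Or.inl hk)
        · exact Or.inl (.base k hk1 (by omega))
    | step j k hj he hjk ih =>
        rcases ih with hL | rfl | hC
        · exact Or.inl (.step j k hL he hjk)
        · refine Or.inr (Or.inr ?_)
          obtain ⟨m, hm⟩ : ∃ m, arr.length = m + 1 := ⟨arr.length - 1, by omega⟩
          rw [hm]
          unfold pvChain
          rw [if_pos ⟨hnz, by omega⟩, he]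
          exact List.mem_cons_self
        · exact Or.inr (Or.inr
            (pvChain_closed hP arr.length idx h1 hlt (by omega) j hC k he hjk))
  · rintro (h | rfl | hC)
    · exact pvReach_mono (by omega) h
    · exact .base _ h1 le_rfl
    · exact pvChain_reach arr.length _ (.base _ h1 le_rfl) k hC

-- A's while loop: its string result is the accumulator followed by the chain-tail string,
-- its flag result sets the chain nodes
lemma pvWhileA_snd (arr : List Int) :
    ∀ (fuel : Nat) (t : Int) (flag : List Int) (chain : String),
      (pvWhileA arr fuel t flag chain).2 = chain ++ pvWTail arr fuel t := by
  intro fuel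
  induction fuel with
  | zero => intro t flag chain; simp [pvWhileA, pvWTail]
  | succ n ih =>
      intro t flag chain
      by_cases hc : PySem.List.pyGetD arr t 0 ≠ 0 ∧ PySem.List.pyGetD arr t 0 > t
      · simp only [pvWhileA, pvWTail, if_pos hc, ih, String.append_assoc]
      · simp only [pvWhileA, pvWTail, if_neg hc, String.append_empty]

lemma pvWhileA_fst (arr : List Int) :
    ∀ (fuel : Nat) (t : Int) (flag : List Int) (chain : String),
      (pvWhileA arr fuel t flag chain).1 =
        (pvChain arr fuel t).foldl (fun fl c => PySem.List.pySetD fl c 1) flag := by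
  intro fuel
  induction fuel with
  | zero => intro t flag chain; rfl
  | succ n ih =>
      intro t flag chain
      by_cases hc : PySem.List.pyGetD arr t 0 ≠ 0 ∧ PySem.List.pyGetD arr t 0 > t
      · simp only [pvWhileA, pvChain, if_pos hc, List.foldl_cons]
        exact ih _ _ _
      · simp only [pvWhileA, pvChain, if_neg hc, List.foldl_nil]

lemma pvSetD_length {α : Type} (flag : List α) (c : Int) (v : α) :
    (PySem.List.pySetD flag c v).length = flag.length := by
  unfold PySem.List.pySetD PySem.List.pySet? PySem.List.pyIdx?
  split <;> [skip; split] <;> [split; skip; skip] <;> simp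

lemma pvSetD_getD {α : Type} (flag : List α) (c : Int) (v d : α) (k : Nat) (h0 : 0 ≤ c)
    (hc : c < (flag.length : Int)) :
    (PySem.List.pySetD flag c v).getD k d = if (k : Int) = c then v else flag.getD k d := by
  unfold PySem.List.pySetD PySem.List.pySet? PySem.List.pyIdx?
  rw [if_pos (by omega), if_pos (by omega)]
  simp only [Option.map_some, Option.getD_some]
  by_cases hk : (k : Int) = c
  · rw [if_pos hk]
    have hkc : k = c.toNat := by omega
    subst hkc
    rw [List.getD_eq_getElem?_getD, List.getElem?_set_self (by omega)]
    simp
  · rw [if_neg hk]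
    rw [List.getD_eq_getElem?_getD, List.getElem?_set_ne (by omega), ← List.getD_eq_getElem?_getD]

lemma pvFoldSet_length (l : List Int) :
    ∀ flag : List Int, (l.foldl (fun fl c => PySem.List.pySetD fl c 1) flag).length = flag.length := by
  induction l with
  | nil => intro flag; rfl
  | cons c l ih =>
      intro flag
      rw [List.foldl_cons, ih, pvSetD_length]

lemma pvFoldSet_getD (l : List Int) :
    ∀ (flag : List Int), (∀ c ∈ l, 0 ≤ c ∧ c < (flag.length : Int)) →
      ∀ k : Nat, ((l.foldl (fun fl c => PySem.List.pySetD fl c 1) flag).getD k 0 ≠ 0 ↔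
        (flag.getD k 0 ≠ 0 ∨ (k : Int) ∈ l)) := by
  induction l with
  | nil => intro flag _ k; simp
  | cons c l ih =>
      intro flag hb k
      have hc := hb c List.mem_cons_self
      rw [List.foldl_cons,
        ih (PySem.List.pySetD flag c 1)
          (fun c' hc' => by rw [pvSetD_length]; exact hb c' (List.mem_cons_of_mem _ hc')) k,
        pvSetD_getD flag c 1 0 k hc.1 hc.2]
      by_cases hk : (k : Int) = c
      · simp [hk, List.mem_cons]
      · rw [if_neg hk]
        simp only [List.mem_cons]
        tauto

lemma pvFoldAdd_mem (arr : List Int) (l : List Int) :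
    ∀ (s0 : PySem.Set Int) (x : Int),
      x ∈ l.foldl (fun s j => if PySem.List.pyGetD arr j 0 > j then PySem.Set.add s (PySem.List.pyGetD arr j 0) else s) s0 ↔
        (x ∈ s0 ∨ ∃ j ∈ l, PySem.List.pyGetD arr j 0 > j ∧ PySem.List.pyGetD arr j 0 = x) := by
  induction l with
  | nil => intro s0 x; simp
  | cons c l ih =>
      intro s0 x
      rw [List.foldl_cons, ih]
      by_cases hc : PySem.List.pyGetD arr c 0 > c
      · rw [if_pos hc]
        simp only [PySem.Set.mem_add, List.mem_cons]
        constructor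
        · rintro ((h | rfl) | ⟨j, hj, h1, h2⟩)
          · exact Or.inl h
          · exact Or.inr ⟨c, Or.inl rfl, hc, rfl⟩
          · exact Or.inr ⟨j, Or.inr hj, h1, h2⟩
        · rintro (h | ⟨j, (rfl | hj), h1, h2⟩)
          · exact Or.inl (Or.inl h)
          · exact Or.inl (Or.inr h2.symm)
          · exact Or.inr ⟨j, hj, h1, h2⟩
      · rw [if_neg hc]
        simp only [List.mem_cons]
        constructor
        · rintro (h | ⟨j, hj, h1, h2⟩)
          · exact Or.inl h
          · exact Or.inr ⟨j, Or.inr hj, h1, h2⟩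
        · rintro (h | ⟨j, (rfl | hj), h1, h2⟩)
          · exact Or.inl h
          · exact absurd h1 hc
          · exact Or.inr ⟨j, hj, h1, h2⟩

-- membership in B's target set
lemma pvTargetsB_mem (arr : List Int) (x : Int) :
    (PySem.Set.contains (pvTargetsB arr) x = true) ↔ pvTgt arr x := by
  rw [PySem.Set.contains_iff]
  unfold pvTargetsB
  rw [pvFoldAdd_mem]
  simp only [PySem.Set.empty, List.not_mem_nil, false_or]
  unfold pvTgt
  constructor
  · rintro ⟨j, hjr, hgt, he⟩
    rw [PySem.List.len_eq, PySem.List.mem_pyRange_one] at hjr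
    exact ⟨j, hjr.1, hjr.2, he, by omega⟩
  · rintro ⟨j, hj1, hjlen, he, hjx⟩
    exact ⟨j, by rw [PySem.List.len_eq, PySem.List.mem_pyRange_one]; exact ⟨hj1, hjlen⟩,
      by omega, he⟩

-- the chain-tail string does not depend on the fuel once it can run to the end of the array
lemma pvWTail_irrel {arr : List Int} (hP : Pre_get_chains arr) :
    ∀ (f f' : Nat) (t : Int), 1 ≤ t → t < (arr.length : Int) →
      arr.length - t.toNat ≤ f → arr.length - t.toNat ≤ f' →
      pvWTail arr f t = pvWTail arr f' t := by
  intro f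
  induction f with
  | zero => intro f' t h1 hl hf hf'; omega
  | succ n ih =>
      intro f' t h1 hl hf hf'
      obtain ⟨m, rfl⟩ : ∃ m, f' = m + 1 := ⟨f' - 1, by omega⟩
      by_cases hc : PySem.List.pyGetD arr t 0 ≠ 0 ∧ PySem.List.pyGetD arr t 0 > t
      · have ha : PySem.List.pyGetD arr t 0 = arr.getD t.toNat 0 := pvAtD_nonneg arr t 0 (by omega)
        have halen : PySem.List.pyGetD arr t 0 < (arr.length : Int) := by
          rw [ha]
          exact hP t.toNat (by omega) (by omega) (by rw [← ha]; omega)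
        simp only [pvWTail, if_pos hc]
        rw [ih m (PySem.List.pyGetD arr t 0) (by omega) halen (by omega) (by omega)]
      · simp only [pvWTail, if_neg hc]

lemma pvWTail_succ (arr : List Int) (f : Nat) (t : Int) :
    pvWTail arr (f + 1) t =
      if PySem.List.pyGetD arr t 0 ≠ 0 ∧ PySem.List.pyGetD arr t 0 > t then
        PySem.Int.toStr (PySem.List.pyGetD arr t 0) ++ " " ++ pvWTail arr f (PySem.List.pyGetD arr t 0)
      else "" := rfl

-- B's backward pass: after processing indices m, m-1, …, 1 every entry 1 ≤ k < n of the
-- table holds the full chain string str(k) + " " + tail(k)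
lemma pvBuild_loop (arr : List Int) (hP : Pre_get_chains arr) :
    ∀ (m : Nat) (S : List String), (m : Int) < (arr.length : Int) →
      S.length = arr.length →
      (∀ k : Nat, m < k → k < arr.length →
        S.getD k "" = PySem.Int.toStr (k : Int) ++ " " ++ pvWTail arr arr.length (k : Int)) →
      ∀ k : Nat, 1 ≤ k → k < arr.length →
        ((PySem.List.pyRange (m : Int) 0 (-1)).foldl (pvBuildStep arr) S).getD k "" =
          PySem.Int.toStr (k : Int) ++ " " ++ pvWTail arr arr.length (k : Int) := by
  intro m
  induction m with
  | zero =>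
      intro S hm hlen hS k hk1 hkn
      rw [PySem.List.pyRange_neg_one_eq_nil (by norm_num), List.foldl_nil]
      exact hS k (by omega) hkn
  | succ m ih =>
      intro S hm hlen hS k hk1 hkn
      rw [show ((m + 1 : Nat) : Int) = (m : Int) + 1 by push_cast; ring,
        PySem.List.pyRange_neg_one_cons (by omega), List.foldl_cons,
        show (m : Int) + 1 - 1 = (m : Int) by ring]
      have hi1 : (1 : Int) ≤ (m : Int) + 1 := by omega
      have hstep_len : (pvBuildStep arr S ((m : Int) + 1)).length = arr.length := by
        unfold pvBuildStep
        rw [pvSetD_length]; exact hlen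
      refine ih (pvBuildStep arr S ((m : Int) + 1)) (by omega) hstep_len (fun k' hk' hk'n => ?_) k hk1 hkn
      unfold pvBuildStep
      rw [pvSetD_getD S ((m : Int) + 1) _ "" k' (by omega) (by rw [hlen]; omega)]
      by_cases hk'm : (k' : Int) = (m : Int) + 1
      · rw [if_pos hk'm, hk'm]
        have hm1n : (m : Int) + 1 < (arr.length : Int) := hm
        obtain ⟨L, hL⟩ : ∃ L, arr.length = L + 1 := ⟨arr.length - 1, by omega⟩
        by_cases hc : PySem.List.pyGetD arr ((m : Int) + 1) 0 ≠ 0 ∧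
            PySem.List.pyGetD arr ((m : Int) + 1) 0 > (m : Int) + 1
        · have ha : PySem.List.pyGetD arr ((m : Int) + 1) 0 = arr.getD ((m : Int) + 1).toNat 0 :=
            pvAtD_nonneg arr _ 0 (by omega)
          have halen : PySem.List.pyGetD arr ((m : Int) + 1) 0 < (arr.length : Int) := by
            rw [ha]
            exact hP ((m : Int) + 1).toNat (by omega) (by omega) (by rw [← ha]; omega)
          set nxt := PySem.List.pyGetD arr ((m : Int) + 1) 0 with hnxt
          have hnxt1 : (m : Int) + 1 < nxt := hc.2
          have hSnxt : PySem.List.pyGetD S nxt "" =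
              PySem.Int.toStr nxt ++ " " ++ pvWTail arr arr.length nxt := by
            rw [pvAtD_nonneg S nxt "" (by omega)]
            have := hS nxt.toNat (by omega) (by omega)
            rwa [show ((nxt.toNat : Nat) : Int) = nxt by omega] at this
          have hwt : pvWTail arr L nxt = pvWTail arr arr.length nxt :=
            pvWTail_irrel hP L arr.length nxt (by omega) halen (by omega) (by omega)
          rw [if_pos hc, hSnxt]
          conv_rhs => rw [hL, pvWTail_succ, if_pos hc, ← hnxt, hwt]
        · rw [if_neg hc]
          conv_rhs => rw [hL, pvWTail_succ, if_neg hc]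
      · rw [if_neg hk'm]
        exact hS k' (by omega) hk'n

-- main loop invariant: A's remaining for loop equals B's remaining emit fold, provided the
-- suffix table S is correct on 1 ≤ k < n
lemma pvForA_eq (arr : List Int) (S : List String) (hP : Pre_get_chains arr)
    (hS : ∀ k : Nat, 1 ≤ k → k < arr.length →
      S.getD k "" = PySem.Int.toStr (k : Int) ++ " " ++ pvWTail arr arr.length (k : Int)) :
    ∀ (rem : Nat) (idx : Int) (flag : List Int) (chains : List String),
      1 ≤ idx → idx + (rem : Int) = (arr.length : Int) →
      flag.length = arr.length →
      (∀ k : Nat, flag.getD k 0 ≠ 0 ↔ pvReach arr (idx - 1) (k : Int)) →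
      pvForA arr rem idx flag chains =
        (PySem.List.pyRange idx (PySem.List.len arr) 1).foldl
          (pvEmitStep arr S (pvTargetsB arr)) chains := by
  intro rem
  induction rem with
  | zero =>
      intro idx flag chains h1 hsum hlen hinv
      rw [PySem.List.len_eq, PySem.List.pyRange_one_eq_nil (by push_cast at hsum; omega)]
      rfl
  | succ n ih =>
      intro idx flag chains h1 hsum hlen hinv
      have hlt : idx < (arr.length : Int) := by push_cast at hsum; omega
      rw [PySem.List.len_eq, PySem.List.pyRange_one_cons hlt, List.foldl_cons,
        ← PySem.List.len_eq arr]
      have hidxcast : ((idx.toNat : Nat) : Int) = idx := by omega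
      have hflag : (PySem.List.pyGetD flag idx 0 ≠ 0) ↔ pvTgt arr idx := by
        rw [pvAtD_nonneg flag idx 0 (by omega)]
        have h := hinv idx.toNat
        rw [hidxcast] at h
        rw [h]
        exact pvReach_pred_iff_tgt arr idx h1
      simp only [pvForA]
      by_cases hT : pvTgt arr idx
      · rw [if_pos (hflag.2 hT)]
        have hB : pvEmitStep arr S (pvTargetsB arr) chains idx = chains := by
          unfold pvEmitStep
          rw [if_neg (fun hand => hand.2 ((pvTargetsB_mem arr idx).2 hT))]
        rw [hB]
        refine ih (idx + 1) flag chains (by omega) (by push_cast at hsum ⊢; omega) hlen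
          (fun k => ?_)
        rw [hinv k, show idx + 1 - 1 = idx from by ring]
        exact (pvReach_succ_of_reach arr idx k h1
          ((pvReach_pred_iff_tgt arr idx h1).2 hT)).symm
      · rw [if_neg (fun hne => hT (hflag.1 hne))]
        by_cases hz : PySem.List.pyGetD arr idx 0 = 0
        · rw [if_pos hz]
          have hB : pvEmitStep arr S (pvTargetsB arr) chains idx = chains := by
            unfold pvEmitStep
            rw [if_neg (fun hand => hand.1 hz)]
          rw [hB]
          refine ih (idx + 1) _ chains (by omega) (by push_cast at hsum ⊢; omega)
            (by rw [pvSetD_length]; exact hlen) (fun k => ?_)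
          rw [pvSetD_getD flag idx 1 0 k (by omega) (by rw [hlen]; exact hlt),
            show idx + 1 - 1 = idx from by ring]
          by_cases hk : (k : Int) = idx
          · rw [if_pos hk]
            constructor
            · intro _; rw [hk]; exact pvReach.base idx h1 le_rfl
            · intro _; norm_num
          · rw [if_neg hk, hinv k, pvReach_succ_zero arr idx (k : Int) h1 hz]
            constructor
            · exact Or.inl
            · rintro (h | h)
              · exact h
              · exact absurd h hk
        · rw [if_neg hz]
          have hB : pvEmitStep arr S (pvTargetsB arr) chains idx =
              chains ++ [(PySem.Int.toStr idx ++ " ") ++ pvWTail arr arr.length idx] := by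
            unfold pvEmitStep
            rw [if_pos ⟨hz, fun hcon => hT ((pvTargetsB_mem arr idx).1 hcon)⟩,
              pvAtD_nonneg S idx "" (by omega)]
            have := hS idx.toNat (by omega) (by omega)
            rw [hidxcast] at this
            rw [this, String.append_assoc]
          rw [hB]
          have hbounds : ∀ c ∈ pvChain arr arr.length idx,
              0 ≤ c ∧ c < ((PySem.List.pySetD flag idx 1).length : Int) := fun c hc => by
            have := pvChain_bounds hP arr.length idx h1 hlt c hc
            rw [pvSetD_length, hlen]
            exact ⟨by omega, this.2⟩
          rw [pvWhileA_snd]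
          refine ih (idx + 1) _ _ (by omega) (by push_cast at hsum ⊢; omega) ?_ (fun k => ?_)
          · rw [pvWhileA_fst, pvFoldSet_length, pvSetD_length]; exact hlen
          · rw [pvWhileA_fst,
              pvFoldSet_getD (pvChain arr arr.length idx) _ hbounds k,
              pvSetD_getD flag idx 1 0 k (by omega) (by rw [hlen]; exact hlt),
              show idx + 1 - 1 = idx from by ring,
              pvReach_succ_chain arr idx (k : Int) hP h1 hlt hz]
            by_cases hk : (k : Int) = idx
            · rw [if_pos hk]
              constructor
              · intro _; exact Or.inr (Or.inl hk)
              · intro _; norm_num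
            · rw [if_neg hk, hinv k]
              constructor
              · rintro (h | h)
                · exact Or.inl h
                · exact Or.inr (Or.inr h)
              · rintro (h | h | h)
                · exact Or.inl h
                · exact absurd h hk
                · exact Or.inr h

-- the suffix table computed by B is correct
lemma pvSuffixB_correct (arr : List Int) (hP : Pre_get_chains arr) (hpos : 0 < arr.length) :
    ∀ k : Nat, 1 ≤ k → k < arr.length →
      (pvSuffixB arr).getD k "" =
        PySem.Int.toStr (k : Int) ++ " " ++ pvWTail arr arr.length (k : Int) := by
  intro k hk1 hkn
  unfold pvSuffixB
  rw [PySem.List.len_eq, show (arr.length : Int) - 1 = (((arr.length - 1 : Nat) : Nat) : Int) by omega]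
  exact pvBuild_loop arr hP (arr.length - 1) (List.replicate arr.length "") (by omega)
    (by simp) (fun k' hk' hk'n => by omega) k hk1 hkn

-- ===== VERDICT (by name: the statement is the Claim_ definition above) =====
theorem get_chains_spec : Claim_equal_get_chains := by
  intro arr hDom hPre
  unfold Spec_get_chains get_chains get_chains_alt
  rcases Nat.eq_zero_or_pos arr.length with h0 | hpos
  · rw [h0]
    rw [PySem.List.len_eq, h0]
    rw [PySem.List.pyRange_one_eq_nil (by norm_num)]
    rfl
  · refine pvForA_eq arr (pvSuffixB arr) hPre (pvSuffixB_correct arr hPre hpos)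
      (arr.length - 1) 1 _ [] le_rfl (by omega) (by simp) (fun k => ?_)
    have hz : (List.replicate arr.length (0 : Int)).getD k 0 = 0 := by
      rw [List.getD_eq_getElem?_getD, List.getElem?_replicate]
      split <;> simp
    rw [hz, show (1 : Int) - 1 = 0 from by norm_num]
    exact ⟨fun h => absurd rfl h, fun h => (pvReach_zero h).elim⟩
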